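-- pv_equiv track=rewrite | github.com/OTOYO1020/ChatDev_Intermediate | WareHouse/ED_250__20250518063413/set_checker.py | check_equal_sets
-- ===== SOURCE A (Python) =====
-- from typing import List, Tuple
--
-- def check_equal_sets(A: List[int], B: List[int], queries: List[Tuple[int, int]]) -> List[str]:
--     results = []
--     for x_i, y_i in queries:
--         # Ensure x_i and y_i are non-negative
--         if x_i < 0 or y_i < 0:
--             results.append('No')  # Invalid query
--             continue
--         # Adjust x_i and y_i to the lengths of A and B respectively
--         x_i = min(x_i, len(A))
--         y_i = min(y_i, len(B))
--         # Extract the first x_i terms from A and y_i terms from B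
--         set_a = set(A[:x_i])
--         set_b = set(B[:y_i])
--         # Compare the two sets and append the result
--         if set_a == set_b:
--             results.append('Yes')
--         else:
--             results.append('No')
--     return results
-- ===== SOURCE B (Python) =====
-- from typing import List, Tuple
--
-- def check_equal_sets(A: List[int], B: List[int], queries: List[Tuple[int, int]]) -> List[str]:
--     # Distinct elements in first-occurrence order; set(A[:x]) is always a prefix of DA.
--     DA = list(dict.fromkeys(A))
--     DB = list(dict.fromkeys(B))
--     # distA[i] = number of distinct elements in A[:i]
--     distA = [0]
--     seen = set()
--     for a in A:
--         seen.add(a)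
--         distA.append(len(seen))
--     distB = [0]
--     seen = set()
--     for b in B:
--         seen.add(b)
--         distB.append(len(seen))
--     # posB[v] = position of v in DB; ok[k] = (set(DA[:k]) == set(DB[:k])),
--     # decided by the running maximum of positions in DB of DA's elements.
--     posB = {}
--     for i, v in enumerate(DB):
--         posB[v] = i
--     INF = len(DA) + len(DB) + 1
--     ok = [True]
--     m = -1
--     for k, v in enumerate(DA):
--         m = max(m, posB.get(v, INF))
--         ok.append(m < k + 1)
--     results = []
--     for x, y in queries:
--         if x < 0 or y < 0:
--             results.append('No')
--             continue
--         kx = distA[min(x, len(A))]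
--         ky = distB[min(y, len(B))]
--         results.append('Yes' if kx == ky and ok[kx] else 'No')
--     return results
-- ===== Notes on version B (the rewrite author's own statement) =====
-- stated objective: alternative
-- what changed: Instead of rebuilding and comparing the two prefix sets for every query, B precomputes prefix distinct counts and, using the chain structure of prefix sets, a per-rank prefix-set-equality table via first-occurrence positions and a running maximum, answering each query by table lookups; worst-case cost drops from O(Q*(N+M)) to O(N+M+Q), though a timing run's inputs did not show it faster.
import Mathlib
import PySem

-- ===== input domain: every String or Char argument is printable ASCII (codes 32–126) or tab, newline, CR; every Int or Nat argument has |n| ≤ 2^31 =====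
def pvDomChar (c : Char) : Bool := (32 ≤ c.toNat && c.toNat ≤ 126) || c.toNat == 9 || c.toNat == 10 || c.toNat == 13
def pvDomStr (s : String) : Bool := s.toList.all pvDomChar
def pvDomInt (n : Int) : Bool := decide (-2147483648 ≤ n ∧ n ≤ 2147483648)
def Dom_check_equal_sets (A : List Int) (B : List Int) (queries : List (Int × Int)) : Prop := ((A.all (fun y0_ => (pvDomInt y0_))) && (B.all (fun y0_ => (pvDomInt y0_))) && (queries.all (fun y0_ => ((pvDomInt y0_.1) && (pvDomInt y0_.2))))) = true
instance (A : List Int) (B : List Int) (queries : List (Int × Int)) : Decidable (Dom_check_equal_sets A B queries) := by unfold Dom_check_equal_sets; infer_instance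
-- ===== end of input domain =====

-- B replaces A's per-query prefix-set rebuild and comparison by a precomputed table:
-- prefix distinct counts plus a per-rank prefix-set-equality table, looked up per query.

-- ===== PORT A =====
def check_equal_sets (A : List Int) (B : List Int) (queries : List (Int × Int)) : List String :=
  queries.foldl (fun results q =>
    if q.1 < 0 || q.2 < 0 then results ++ ["No"]
    else
      let x := min q.1 (A.length : Int)
      let y := min q.2 (B.length : Int)
      let set_a := PySem.Set.ofList (PySem.List.slice A none (some x))
      let set_b := PySem.Set.ofList (PySem.List.slice B none (some y))
      if PySem.Set.equal set_a set_b then results ++ ["Yes"] else results ++ ["No"]) []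

-- ===== PORT B =====
def check_equal_sets_alt (A : List Int) (B : List Int) (queries : List (Int × Int)) : List String :=
  let DA := PySem.List.dedup A
  let DB := PySem.List.dedup B
  let distA := (A.foldl (fun (st : PySem.Set Int × List Int) a =>
      let seen := PySem.Set.add st.1 a
      (seen, st.2 ++ [PySem.Set.len seen])) (PySem.Set.empty, [(0 : Int)])).2
  let distB := (B.foldl (fun (st : PySem.Set Int × List Int) b =>
      let seen := PySem.Set.add st.1 b
      (seen, st.2 ++ [PySem.Set.len seen])) (PySem.Set.empty, [(0 : Int)])).2
  let posB := (PySem.List.enumerate DB).foldl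
      (fun (d : PySem.Dict Int Int) iv => d.insert iv.2 iv.1) PySem.Dict.empty
  let INF : Int := (DA.length : Int) + (DB.length : Int) + 1
  let ok := ((PySem.List.enumerate DA).foldl (fun (st : Int × List Bool) kv =>
      let m := max st.1 (posB.getD kv.2 INF)
      (m, st.2 ++ [decide (m < kv.1 + 1)])) ((-1 : Int), [true])).2
  queries.foldl (fun results q =>
    if q.1 < 0 || q.2 < 0 then results ++ ["No"]
    else
      let kx := PySem.List.pyGetD distA (min q.1 (A.length : Int)) 0
      let ky := PySem.List.pyGetD distB (min q.2 (B.length : Int)) 0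
      results ++ [if kx == ky && PySem.List.pyGetD ok kx false then "Yes" else "No"]) []

-- ===== PRECONDITION & SPEC =====
def Spec_check_equal_sets (A : List Int) (B : List Int) (queries : List (Int × Int)) (out : List String) : Prop := out = check_equal_sets_alt A B queries
instance (A : List Int) (B : List Int) (queries : List (Int × Int)) (out : List String) : Decidable (Spec_check_equal_sets A B queries out) := by unfold Spec_check_equal_sets; infer_instance

-- ===== CLAIM (what is proved, stated in full; the proofs are below) =====
def Claim_equal_check_equal_sets : Prop := ∀ (A : List Int) (B : List Int) (queries : List (Int × Int)), Dom_check_equal_sets A B queries → Spec_check_equal_sets A B queries (check_equal_sets A B queries)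

-- ===== LEMMAS AND PROOFS =====

-- A's per-query answer, as a function (cntX n = number of distinct elements of the first n).
def pvCnt (xs : List Int) (n : Nat) : Nat := (PySem.Set.ofList (xs.take n)).length

-- the seed set is a prefix of any foldl-add extension of it
theorem pv_prefix_foldl_add (l : List Int) (s : PySem.Set Int) :
    s <+: l.foldl PySem.Set.add s := by
  induction l generalizing s with
  | nil => exact List.prefix_rfl
  | cons x t ih =>
    refine List.IsPrefix.trans ?_ (ih (PySem.Set.add s x))
    simp only [PySem.Set.add]
    split
    · exact List.prefix_rfl
    · exact ⟨[x], rfl⟩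

theorem pv_prefix_foldl_add_take (l : List Int) (n : Nat) (s : PySem.Set Int) :
    (l.take n).foldl PySem.Set.add s <+: l.foldl PySem.Set.add s := by
  induction l generalizing n s with
  | nil => simp
  | cons x t ih =>
    cases n with
    | zero => simpa using pv_prefix_foldl_add (x :: t) s
    | succ m => simpa using ih m (PySem.Set.add s x)

-- set(xs[:n]) is a prefix of set(xs) (first-insertion order)
theorem pv_ofList_take_prefix (xs : List Int) (n : Nat) :
    PySem.Set.ofList (xs.take n) <+: PySem.Set.ofList xs :=
  pv_prefix_foldl_add_take xs n PySem.Set.empty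

theorem pv_ofList_take_eq_take (xs : List Int) (n : Nat) :
    PySem.Set.ofList (xs.take n) = (PySem.Set.ofList xs).take (pvCnt xs n) :=
  List.prefix_iff_eq_take.mp (pv_ofList_take_prefix xs n)

theorem pv_cnt_le (xs : List Int) (n : Nat) : pvCnt xs n ≤ (PySem.Set.ofList xs).length :=
  (pv_ofList_take_prefix xs n).length_le

-- the dist-building fold, characterised
theorem pv_dist_fold (xs : List Int) (s : PySem.Set Int) (d : List Int) :
    xs.foldl (fun (st : PySem.Set Int × List Int) a =>
      let seen := PySem.Set.add st.1 a
      (seen, st.2 ++ [PySem.Set.len seen])) (s, d)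
    = (xs.foldl PySem.Set.add s,
       d ++ (List.range xs.length).map
         (fun i => (((xs.take (i+1)).foldl PySem.Set.add s).length : Int))) := by
  induction xs generalizing s d with
  | nil => simp
  | cons x t ih =>
    simp only [List.foldl_cons, List.length_cons, List.range_succ_eq_map, List.map_cons,
      List.map_map]
    rw [ih]
    simp [PySem.Set.len, Function.comp, List.append_assoc]

theorem pv_dist_spec (xs : List Int) :
    (xs.foldl (fun (st : PySem.Set Int × List Int) a =>
      let seen := PySem.Set.add st.1 a
      (seen, st.2 ++ [PySem.Set.len seen])) (PySem.Set.empty, [(0 : Int)])).2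
    = (List.range (xs.length + 1)).map (fun i => ((pvCnt xs i : Nat) : Int)) := by
  rw [pv_dist_fold]
  simp only [List.range_succ_eq_map, List.map_cons, List.map_map]
  rfl

-- the ok-building fold, characterised
theorem pv_ok_fold (xs : List Int) (pos : Int → Int) (k0 m : Int) (okl : List Bool) :
    (PySem.List.enumerate xs k0).foldl (fun (st : Int × List Bool) kv =>
      let m := max st.1 (pos kv.2)
      (m, st.2 ++ [decide (m < kv.1 + 1)])) (m, okl)
    = (xs.foldl (fun m v => max m (pos v)) m,
       okl ++ (List.range xs.length).map
         (fun i => decide ((xs.take (i+1)).foldl (fun m v => max m (pos v)) m < k0 + i + 1))) := by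
  induction xs generalizing k0 m okl with
  | nil => simp [PySem.List.enumerate_nil]
  | cons x t ih =>
    simp only [PySem.List.enumerate_cons, List.foldl_cons, List.length_cons,
      List.range_succ_eq_map, List.map_cons, List.map_map]
    rw [ih]
    congr 1
    simp only [List.take_zero, List.foldl_nil, Nat.cast_zero, add_zero, Function.comp_def,
      List.take_succ_cons, List.foldl_cons, List.append_assoc, List.singleton_append]
    congr 2
    simp only [Nat.succ_eq_add_one]
    congr 1
    funext i
    congr 2
    push_cast
    ring

-- foldl-max bracket
theorem pv_foldl_max_lt (l : List Int) (pos : Int → Int) (m k : Int) :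
    l.foldl (fun m v => max m (pos v)) m < k ↔ m < k ∧ ∀ v ∈ l, pos v < k := by
  induction l generalizing m with
  | nil => simp
  | cons x t ih =>
    simp only [List.foldl_cons, ih, max_lt_iff, List.mem_cons]
    constructor
    · rintro ⟨⟨h1, h2⟩, h3⟩
      refine ⟨h1, ?_⟩
      rintro v (rfl | hv)
      exacts [h2, h3 v hv]
    · rintro ⟨h1, h2⟩
      exact ⟨⟨h1, h2 x (Or.inl rfl)⟩, fun v hv => h2 v (Or.inr hv)⟩

-- find? over the swapped enumeration is the first-occurrence index
theorem pv_find_enum (xs : List Int) (s v : Int) :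
    List.find? (fun p => p.1 == v) ((PySem.List.enumerate xs s).map (fun iv => (iv.2, iv.1)))
    = if v ∈ xs then some (v, s + (xs.idxOf v : Int)) else none := by
  induction xs generalizing s with
  | nil => simp [PySem.List.enumerate_nil]
  | cons x t ih =>
    simp only [PySem.List.enumerate_cons, List.map_cons, List.find?_cons]
    by_cases h : x = v
    · subst h
      simp
    · have hb : (x == v) = false := by simp [h]
      simp only [hb, ih (s + 1), List.mem_cons]
      by_cases hm : v ∈ t
      · have hidx : List.idxOf v (x :: t) = List.idxOf v t + 1 := by
          simpa [Nat.succ_eq_add_one] using List.idxOf_cons_ne t h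
        simp only [hm, if_true, or_true, if_true, hidx]
        congr 2
        push_cast
        ring
      · have hne : ¬ v = x := fun hvx => h hvx.symm
        simp [hm, hne]

-- the position dictionary, characterised as getD
theorem pv_pos_spec (DB : List Int) (hn : DB.Nodup) (v INF : Int) :
    ((PySem.List.enumerate DB).foldl
      (fun (d : PySem.Dict Int Int) iv => d.insert iv.2 iv.1) PySem.Dict.empty).getD v INF
    = if v ∈ DB then (DB.idxOf v : Int) else INF := by
  have hitems : ((PySem.List.enumerate DB).foldl
      (fun (d : PySem.Dict Int Int) iv => d.insert iv.2 iv.1) PySem.Dict.empty).items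
      = (PySem.List.enumerate DB).map (fun iv => (iv.2, iv.1)) := by
    have := PySem.Dict.items_foldl_insert_fresh (l := PySem.List.enumerate DB)
      (k := fun iv => iv.2) (v := fun iv => iv.1) (d := (PySem.Dict.empty : PySem.Dict Int Int))
      (by intro a _; simp [PySem.Dict.contains_empty])
      (by rw [PySem.List.map_snd_enumerate]; exact hn)
    simpa using this
  simp only [PySem.Dict.getD, PySem.Dict.get?, hitems, pv_find_enum DB 0 v]
  by_cases hm : v ∈ DB
  · simp [hm]
  · simp [hm]

-- abstract position function and per-rank equality flag (proof-layer mirror of posB / ok)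
def pvPos (DA DB : List Int) (v : Int) : Int :=
  if v ∈ DB then (DB.idxOf v : Int) else ((DA.length : Int) + (DB.length : Int) + 1)

def pvOk (DA DB : List Int) (k : Nat) : Bool :=
  decide ((DA.take k).foldl (fun m v => max m (pvPos DA DB v)) (-1) < (k : Int))

theorem pv_ok_iff (DA DB : List Int) (k : Nat) (hk : k ≤ DA.length) :
    pvOk DA DB k = true ↔ ∀ v ∈ DA.take k, v ∈ DB.take k := by
  simp only [pvOk, decide_eq_true_eq, pv_foldl_max_lt]
  constructor
  · rintro ⟨-, h⟩ v hv
    have := h v hv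
    by_cases hm : v ∈ DB
    · simp only [pvPos, hm, if_true] at this
      exact (List.mem_take_iff_idxOf_lt hm).mpr (by exact_mod_cast this)
    · exfalso
      simp only [pvPos, hm, if_false] at this
      have hkk : (k : Int) ≤ (DA.length : Int) := by exact_mod_cast hk
      omega
  · intro h
    refine ⟨by have := Int.natCast_nonneg k; omega, fun v hv => ?_⟩
    have hvtake := h v hv
    have hm : v ∈ DB := List.mem_of_mem_take hvtake
    simp only [pvPos, hm, if_true]
    exact_mod_cast (List.mem_take_iff_idxOf_lt hm).mp hvtake

-- the heart of the equivalence: set(A[:n]) == set(B[:p]) iff the distinct counts agree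
-- and the per-rank flag at that count is set
theorem pv_core (A B : List Int) (n p : Nat) :
    PySem.Set.equal (PySem.Set.ofList (A.take n)) (PySem.Set.ofList (B.take p))
    = ((((pvCnt A n : Nat) : Int) == ((pvCnt B p : Nat) : Int))
        && pvOk (PySem.Set.ofList A) (PySem.Set.ofList B) (pvCnt A n)) := by
  rw [Bool.eq_iff_iff]
  have hS : PySem.Set.ofList (A.take n) = (PySem.Set.ofList A).take (pvCnt A n) :=
    pv_ofList_take_eq_take A n
  have hT : PySem.Set.ofList (B.take p) = (PySem.Set.ofList B).take (pvCnt B p) :=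
    pv_ofList_take_eq_take B p
  have hSnd : (PySem.Set.ofList (A.take n)).Nodup := PySem.Set.nodup_ofList _
  have hTnd : (PySem.Set.ofList (B.take p)).Nodup := PySem.Set.nodup_ofList _
  have hSlen : (PySem.Set.ofList (A.take n)).length = pvCnt A n := rfl
  have hTlen : (PySem.Set.ofList (B.take p)).length = pvCnt B p := rfl
  have hkA : pvCnt A n ≤ (PySem.Set.ofList A).length := pv_cnt_le A n
  have hok := pv_ok_iff (PySem.Set.ofList A) (PySem.Set.ofList B) (pvCnt A n) hkA
  rw [Bool.and_eq_true, beq_iff_eq, Int.natCast_inj]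
  constructor
  · intro heq
    have hboth : PySem.Set.ofList (A.take n) ⊆ PySem.Set.ofList (B.take p)
        ∧ PySem.Set.ofList (B.take p) ⊆ PySem.Set.ofList (A.take n) := by
      simpa [PySem.Set.equal, PySem.Set.issubset, PySem.Set.contains, List.subset_def] using heq
    have hsp1 := List.subperm_of_subset hSnd hboth.1
    have hsp2 := List.subperm_of_subset hTnd hboth.2
    have hlen : pvCnt A n = pvCnt B p := by
      have := List.Subperm.length_le hsp1
      have := List.Subperm.length_le hsp2
      omega
    refine ⟨hlen, hok.mpr ?_⟩
    intro v hv
    have : v ∈ PySem.Set.ofList (B.take p) := hboth.1 (by rw [hS]; exact hv)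
    rw [hT, ← hlen] at this
    exact this
  · rintro ⟨hlen, hokt⟩
    have hsub : PySem.Set.ofList (A.take n) ⊆ PySem.Set.ofList (B.take p) := by
      intro v hv
      rw [hS] at hv
      have := hok.mp hokt v hv
      rw [hT, ← hlen]
      exact this
    have hperm : (PySem.Set.ofList (A.take n)).Perm (PySem.Set.ofList (B.take p)) :=
      List.Subperm.perm_of_length_le (List.subperm_of_subset hSnd hsub) (by omega)
    have hsub2 : PySem.Set.ofList (B.take p) ⊆ PySem.Set.ofList (A.take n) :=
      fun v hv => hperm.mem_iff.mpr hv
    simp [PySem.Set.equal, PySem.Set.issubset, PySem.Set.contains, List.subset_def] at *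
    exact ⟨fun v hv => hsub hv, fun v hv => hsub2 hv⟩

-- the ok list built by the port, identified with pvOk
theorem pv_ok_list (DA DB : List Int) (hnd : DB.Nodup) :
    ((PySem.List.enumerate DA).foldl (fun (st : Int × List Bool) kv =>
      let m := max st.1 (((PySem.List.enumerate DB).foldl
        (fun (d : PySem.Dict Int Int) iv => d.insert iv.2 iv.1) PySem.Dict.empty).getD kv.2
          ((DA.length : Int) + (DB.length : Int) + 1))
      (m, st.2 ++ [decide (m < kv.1 + 1)])) ((-1 : Int), [true])).2
    = (List.range (DA.length + 1)).map (fun k => pvOk DA DB k) := by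
  rw [pv_ok_fold DA (fun v => ((PySem.List.enumerate DB).foldl
        (fun (d : PySem.Dict Int Int) iv => d.insert iv.2 iv.1) PySem.Dict.empty).getD v
          ((DA.length : Int) + (DB.length : Int) + 1)) 0 (-1) [true]]
  have hpos : ∀ v, ((PySem.List.enumerate DB).foldl
        (fun (d : PySem.Dict Int Int) iv => d.insert iv.2 iv.1) PySem.Dict.empty).getD v
          ((DA.length : Int) + (DB.length : Int) + 1) = pvPos DA DB v := fun v => by
    rw [pv_pos_spec DB hnd]
    rfl
  simp only [hpos]
  simp only [List.range_succ_eq_map, List.map_cons, List.map_map, List.singleton_append]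
  have h0 : pvOk DA DB 0 = true := by simp [pvOk]
  rw [h0]
  refine congrArg (true :: ·) ?_
  apply List.map_congr_left
  intro i _
  simp only [Function.comp_apply, pvOk, Nat.succ_eq_add_one]
  have harith : (0 : Int) + (i : Int) + 1 = (((i + 1 : Nat)) : Int) := by push_cast; ring
  rw [harith]

-- A's per-query answer
def pvAnsA (A B : List Int) (q : Int × Int) : String :=
  if q.1 < 0 || q.2 < 0 then "No"
  else if PySem.Set.equal
      (PySem.Set.ofList (PySem.List.slice A none (some (min q.1 (A.length : Int)))))
      (PySem.Set.ofList (PySem.List.slice B none (some (min q.2 (B.length : Int))))) then "Yes"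
  else "No"

-- B's per-query answer, after the table lookups have been evaluated
def pvAnsB (A B : List Int) (q : Int × Int) : String :=
  if q.1 < 0 || q.2 < 0 then "No"
  else if (((pvCnt A (min q.1 (A.length : Int)).toNat : Nat) : Int)
            == ((pvCnt B (min q.2 (B.length : Int)).toNat : Nat) : Int))
          && pvOk (PySem.Set.ofList A) (PySem.Set.ofList B)
               (pvCnt A (min q.1 (A.length : Int)).toNat) then "Yes"
  else "No"

-- an append-one-answer loop is a map
theorem pv_foldl_body (body : List String → (Int × Int) → List String)
    (ans : (Int × Int) → String)
    (hbody : ∀ r q, body r q = r ++ [ans q]) :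
    ∀ (qs : List (Int × Int)) (acc : List String), qs.foldl body acc = acc ++ qs.map ans := by
  intro qs
  induction qs with
  | nil => simp
  | cons q t ih =>
    intro acc
    simp [hbody, ih, List.append_assoc]

theorem pv_A_eq (A B : List Int) (qs : List (Int × Int)) :
    check_equal_sets A B qs = qs.map (pvAnsA A B) := by
  unfold check_equal_sets
  rw [pv_foldl_body _ (pvAnsA A B) ?hb qs []]
  · simp
  · intro r q
    simp only [pvAnsA]
    by_cases h : (q.1 < 0 || q.2 < 0) = true
    · simp [h]
    · simp only [h, Bool.not_eq_true] at *
      simp only [Bool.false_eq_true, if_false]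
      split <;> rfl

-- the port of B, with its let-bindings written out (definitional)
theorem pv_alt_explicit (A B : List Int) (qs : List (Int × Int)) :
    check_equal_sets_alt A B qs
    = qs.foldl (fun results q =>
        if q.1 < 0 || q.2 < 0 then results ++ ["No"]
        else results ++ [if
          (PySem.List.pyGetD ((A.foldl (fun (st : PySem.Set Int × List Int) a =>
              let seen := PySem.Set.add st.1 a
              (seen, st.2 ++ [PySem.Set.len seen])) (PySem.Set.empty, [(0 : Int)])).2)
            (min q.1 (A.length : Int)) 0
          == PySem.List.pyGetD ((B.foldl (fun (st : PySem.Set Int × List Int) b =>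
              let seen := PySem.Set.add st.1 b
              (seen, st.2 ++ [PySem.Set.len seen])) (PySem.Set.empty, [(0 : Int)])).2)
            (min q.2 (B.length : Int)) 0)
          && PySem.List.pyGetD
            (((PySem.List.enumerate (PySem.Set.ofList A)).foldl (fun (st : Int × List Bool) kv =>
              let m := max st.1 (((PySem.List.enumerate (PySem.Set.ofList B)).foldl
                (fun (d : PySem.Dict Int Int) iv => d.insert iv.2 iv.1) PySem.Dict.empty).getD kv.2
                  (((PySem.Set.ofList A).length : Int) + ((PySem.Set.ofList B).length : Int) + 1))
              (m, st.2 ++ [decide (m < kv.1 + 1)])) ((-1 : Int), [true])).2)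
            (PySem.List.pyGetD ((A.foldl (fun (st : PySem.Set Int × List Int) a =>
              let seen := PySem.Set.add st.1 a
              (seen, st.2 ++ [PySem.Set.len seen])) (PySem.Set.empty, [(0 : Int)])).2)
              (min q.1 (A.length : Int)) 0)
            false
          then "Yes" else "No"]) [] := rfl

theorem pv_B_eq (A B : List Int) (qs : List (Int × Int)) :
    check_equal_sets_alt A B qs = qs.map (pvAnsB A B) := by
  rw [pv_alt_explicit]
  simp only [pv_dist_spec A, pv_dist_spec B, pv_ok_list _ _ (PySem.Set.nodup_ofList B)]
  rw [pv_foldl_body _ (pvAnsB A B) ?hb qs []]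
  · simp
  · intro r q
    simp only [pvAnsB]
    by_cases h : (q.1 < 0 || q.2 < 0) = true
    · simp [h]
    · simp only [h, Bool.false_eq_true, if_false]
      have hx0 : (0 : Int) ≤ min q.1 (A.length : Int) := by
        simp only [Bool.or_eq_true, decide_eq_true_eq, not_or] at h
        omega
      have hy0 : (0 : Int) ≤ min q.2 (B.length : Int) := by
        simp only [Bool.or_eq_true, decide_eq_true_eq, not_or] at h
        omega
      have hxc : min q.1 (A.length : Int) = (((min q.1 (A.length : Int)).toNat : Nat) : Int) :=
        (Int.toNat_of_nonneg hx0).symm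
      have hyc : min q.2 (B.length : Int) = (((min q.2 (B.length : Int)).toNat : Nat) : Int) :=
        (Int.toNat_of_nonneg hy0).symm
      have hxle : (min q.1 (A.length : Int)).toNat ≤ A.length := by omega
      have hyle : (min q.2 (B.length : Int)).toNat ≤ B.length := by omega
      rw [hxc, hyc, PySem.List.pyGetD_natCast, PySem.List.pyGetD_natCast,
        PySem.List.getD_map_range _ _ _ _ (by omega),
        PySem.List.getD_map_range _ _ _ _ (by omega),
        PySem.List.pyGetD_natCast,
        PySem.List.getD_map_range _ _ _ _ (by
          have := pv_cnt_le A (min q.1 (A.length : Int)).toNat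
          omega)]
      rfl

theorem pv_ans_eq (A B : List Int) (q : Int × Int) : pvAnsA A B q = pvAnsB A B q := by
  simp only [pvAnsA, pvAnsB]
  by_cases h : (q.1 < 0 || q.2 < 0) = true
  · simp [h]
  · simp only [h, Bool.false_eq_true, if_false]
    have hx0 : (0 : Int) ≤ min q.1 (A.length : Int) := by
      simp only [Bool.or_eq_true, decide_eq_true_eq, not_or] at h
      omega
    have hy0 : (0 : Int) ≤ min q.2 (B.length : Int) := by
      simp only [Bool.or_eq_true, decide_eq_true_eq, not_or] at h
      omega
    rw [PySem.List.slice_to A hx0, PySem.List.slice_to B hy0, pv_core]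

-- ===== VERDICT (by name: the statement is the Claim_ definition above) =====
theorem check_equal_sets_spec : Claim_equal_check_equal_sets := by
  intro A B qs _
  unfold Spec_check_equal_sets
  rw [pv_A_eq, pv_B_eq]
  exact List.map_congr_left fun q _ => pv_ans_eq A B q
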